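-- pv_equiv track=rewrite | github.com/Marigiaco/reposit-rio-Mariana-e-Joana | funcoes.py | calcula_pontos_regra_simples
-- ===== SOURCE A (Python) =====
-- def calcula_pontos_regra_simples (d):
--     resultado = {}
--     f = 1
--     while f<=6:
--         soma = 0
--         i = 0
--
--         while i<len(d):
--             if d[i] ==f:
--                 soma = soma + d[i]
--             i = i +1
--
--         resultado[f] = soma
--         f = f +1
--
--     return resultado
-- ===== SOURCE B (Python) =====
-- def calcula_pontos_regra_simples(d):
--     resultado = {f: 0 for f in range(1, 7)}
--     for x in d:
--         if x in (1, 2, 3, 4, 5, 6):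
--             resultado[x] += x
--     return resultado
-- ===== Notes on version B (the rewrite author's own statement) =====
-- stated objective: faster
-- what changed: Replaces A's six full scans of d (one per face value) with a single pass that accumulates each element directly into a pre-initialised dict.
import Mathlib
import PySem

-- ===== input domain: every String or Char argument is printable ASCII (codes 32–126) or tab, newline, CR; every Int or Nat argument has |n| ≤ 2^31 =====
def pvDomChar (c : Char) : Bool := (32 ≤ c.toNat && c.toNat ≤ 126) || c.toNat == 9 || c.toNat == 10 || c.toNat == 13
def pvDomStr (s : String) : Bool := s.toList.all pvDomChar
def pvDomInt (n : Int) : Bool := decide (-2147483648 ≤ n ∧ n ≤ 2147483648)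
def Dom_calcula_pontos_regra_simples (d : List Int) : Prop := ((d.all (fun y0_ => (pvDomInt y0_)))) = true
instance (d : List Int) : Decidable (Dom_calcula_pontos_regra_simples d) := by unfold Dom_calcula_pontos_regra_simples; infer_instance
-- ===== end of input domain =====

-- B replaces A's six full scans of the list (one per face value 1..6) with a single
-- accumulating pass into a pre-initialised dict (objective: faster, constant factor).


-- ===== PORT A =====
-- literal port of A: outer while f<=6 is a fold over range(1,7); inner while scans
-- d by index, summing the entries equal to f; resultado[f] = soma is Dict.insert.
def calcula_pontos_regra_simples (d : List Int) : List (Int × Int) :=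
  ((PySem.List.pyRange 1 7 1).foldl
    (fun resultado f =>
      let soma := (PySem.List.pyRange 0 (PySem.List.len d) 1).foldl
        (fun soma i =>
          if PySem.List.pyGetD d i 0 = f then soma + PySem.List.pyGetD d i 0 else soma) 0
      resultado.insert f soma)
    PySem.Dict.empty).items

-- ===== PORT B =====
-- port of Source B: dict pre-initialised with keys 1..6, one pass over d accumulating x.
def calcula_pontos_regra_simples_alt (d : List Int) : List (Int × Int) :=
  (d.foldl
    (fun resultado x =>
      if x = 1 ∨ x = 2 ∨ x = 3 ∨ x = 4 ∨ x = 5 ∨ x = 6 then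
        resultado.modify x 0 (· + x)
      else resultado)
    (PySem.Dict.ofList [(1, 0), (2, 0), (3, 0), (4, 0), (5, 0), (6, 0)])).items

-- ===== PRECONDITION & SPEC =====
def Spec_calcula_pontos_regra_simples (d : List Int) (out : List (Int × Int)) : Prop := out = calcula_pontos_regra_simples_alt d
instance (d : List Int) (out : List (Int × Int)) : Decidable (Spec_calcula_pontos_regra_simples d out) := by unfold Spec_calcula_pontos_regra_simples; infer_instance

-- ===== CLAIM (what is proved, stated in full; the proofs are below) =====
def Claim_equal_calcula_pontos_regra_simples : Prop := ∀ (d : List Int), Dom_calcula_pontos_regra_simples d → Spec_calcula_pontos_regra_simples d (calcula_pontos_regra_simples d)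

-- ===== LEMMAS AND PROOFS =====

-- sum of the elements of d equal to f
def pvS (d : List Int) (f : Int) : Int := (d.filter (fun x => x = f)).sum

theorem pvS_cons (x : Int) (d : List Int) (f : Int) :
    pvS (x :: d) f = if x = f then x + pvS d f else pvS d f := by
  by_cases h : x = f
  · simp [pvS, h]
  · simp [pvS, h]

theorem pvA_inner (d : List Int) (f : Int) (a : Int) :
    d.foldl (fun soma x => if x = f then soma + x else soma) a = a + pvS d f := by
  induction d generalizing a with
  | nil => simp [pvS]
  | cons x d ih =>
    by_cases h : x = f <;> simp [List.foldl, h, ih, pvS_cons] <;> ring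

theorem pvA_eq (d : List Int) :
    calcula_pontos_regra_simples d =
      [(1, pvS d 1), (2, pvS d 2), (3, pvS d 3), (4, pvS d 4), (5, pvS d 5), (6, pvS d 6)] := by
  unfold calcula_pontos_regra_simples
  rw [show PySem.List.pyRange 1 7 1 = [1, 2, 3, 4, 5, 6] from by decide]
  simp only [List.foldl, PySem.List.len_eq]
  rw [PySem.List.foldl_pyRange_zero_pyGetD' d 0 (fun soma x => if x = 1 then soma + x else soma) 0,
      PySem.List.foldl_pyRange_zero_pyGetD' d 0 (fun soma x => if x = 2 then soma + x else soma) 0,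
      PySem.List.foldl_pyRange_zero_pyGetD' d 0 (fun soma x => if x = 3 then soma + x else soma) 0,
      PySem.List.foldl_pyRange_zero_pyGetD' d 0 (fun soma x => if x = 4 then soma + x else soma) 0,
      PySem.List.foldl_pyRange_zero_pyGetD' d 0 (fun soma x => if x = 5 then soma + x else soma) 0,
      PySem.List.foldl_pyRange_zero_pyGetD' d 0 (fun soma x => if x = 6 then soma + x else soma) 0]
  simp [pvA_inner, PySem.Dict.insert, PySem.Dict.empty, PySem.Dict.items, PySem.Dict.contains]

theorem pvmod1 (v1 v2 v3 v4 v5 v6 : Int) :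
    (PySem.Dict.mk [((1:Int), v1), (2, v2), (3, v3), (4, v4), (5, v5), (6, v6)]).modify 1 0 (· + 1) =
    PySem.Dict.mk [((1:Int), v1 + 1), (2, v2), (3, v3), (4, v4), (5, v5), (6, v6)] := by
  simp [PySem.Dict.modify, PySem.Dict.insert, PySem.Dict.contains, PySem.Dict.getD, PySem.Dict.get?, PySem.Dict.items]

theorem pvmod2 (v1 v2 v3 v4 v5 v6 : Int) :
    (PySem.Dict.mk [((1:Int), v1), (2, v2), (3, v3), (4, v4), (5, v5), (6, v6)]).modify 2 0 (· + 2) =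
    PySem.Dict.mk [((1:Int), v1), (2, v2 + 2), (3, v3), (4, v4), (5, v5), (6, v6)] := by
  simp [PySem.Dict.modify, PySem.Dict.insert, PySem.Dict.contains, PySem.Dict.getD, PySem.Dict.get?, PySem.Dict.items]

theorem pvmod3 (v1 v2 v3 v4 v5 v6 : Int) :
    (PySem.Dict.mk [((1:Int), v1), (2, v2), (3, v3), (4, v4), (5, v5), (6, v6)]).modify 3 0 (· + 3) =
    PySem.Dict.mk [((1:Int), v1), (2, v2), (3, v3 + 3), (4, v4), (5, v5), (6, v6)] := by
  simp [PySem.Dict.modify, PySem.Dict.insert, PySem.Dict.contains, PySem.Dict.getD, PySem.Dict.get?, PySem.Dict.items]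

theorem pvmod4 (v1 v2 v3 v4 v5 v6 : Int) :
    (PySem.Dict.mk [((1:Int), v1), (2, v2), (3, v3), (4, v4), (5, v5), (6, v6)]).modify 4 0 (· + 4) =
    PySem.Dict.mk [((1:Int), v1), (2, v2), (3, v3), (4, v4 + 4), (5, v5), (6, v6)] := by
  simp [PySem.Dict.modify, PySem.Dict.insert, PySem.Dict.contains, PySem.Dict.getD, PySem.Dict.get?, PySem.Dict.items]

theorem pvmod5 (v1 v2 v3 v4 v5 v6 : Int) :
    (PySem.Dict.mk [((1:Int), v1), (2, v2), (3, v3), (4, v4), (5, v5), (6, v6)]).modify 5 0 (· + 5) =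
    PySem.Dict.mk [((1:Int), v1), (2, v2), (3, v3), (4, v4), (5, v5 + 5), (6, v6)] := by
  simp [PySem.Dict.modify, PySem.Dict.insert, PySem.Dict.contains, PySem.Dict.getD, PySem.Dict.get?, PySem.Dict.items]

theorem pvmod6 (v1 v2 v3 v4 v5 v6 : Int) :
    (PySem.Dict.mk [((1:Int), v1), (2, v2), (3, v3), (4, v4), (5, v5), (6, v6)]).modify 6 0 (· + 6) =
    PySem.Dict.mk [((1:Int), v1), (2, v2), (3, v3), (4, v4), (5, v5), (6, v6 + 6)] := by
  simp [PySem.Dict.modify, PySem.Dict.insert, PySem.Dict.contains, PySem.Dict.getD, PySem.Dict.get?, PySem.Dict.items]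

theorem pvB_fold (d : List Int) (v1 v2 v3 v4 v5 v6 : Int) :
    d.foldl
      (fun resultado x =>
        if x = 1 ∨ x = 2 ∨ x = 3 ∨ x = 4 ∨ x = 5 ∨ x = 6 then
          resultado.modify x 0 (· + x)
        else resultado)
      (PySem.Dict.mk [(1, v1), (2, v2), (3, v3), (4, v4), (5, v5), (6, v6)]) =
    PySem.Dict.mk [(1, v1 + pvS d 1), (2, v2 + pvS d 2), (3, v3 + pvS d 3),
                   (4, v4 + pvS d 4), (5, v5 + pvS d 5), (6, v6 + pvS d 6)] := by
  induction d generalizing v1 v2 v3 v4 v5 v6 with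
  | nil => simp [pvS]
  | cons x d ih =>
    by_cases h1 : x = 1
    · subst h1
      simp only [List.foldl_cons, if_pos (show (1:Int) = 1 ∨ (1:Int) = 2 ∨ (1:Int) = 3 ∨ (1:Int) = 4 ∨ (1:Int) = 5 ∨ (1:Int) = 6 from by norm_num)]
      rw [if_pos (show True ∨ (1:Int) = 2 ∨ (1:Int) = 3 ∨ (1:Int) = 4 ∨ (1:Int) = 5 ∨ (1:Int) = 6 from by tauto), pvmod1, ih]
      simp [pvS_cons, add_assoc]
    · by_cases h2 : x = 2
      · subst h2
        simp only [List.foldl_cons, if_pos (show (2:Int) = 1 ∨ (2:Int) = 2 ∨ (2:Int) = 3 ∨ (2:Int) = 4 ∨ (2:Int) = 5 ∨ (2:Int) = 6 from by norm_num)]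
        rw [if_pos (show (2:Int) = 1 ∨ True ∨ (2:Int) = 3 ∨ (2:Int) = 4 ∨ (2:Int) = 5 ∨ (2:Int) = 6 from by tauto), pvmod2, ih]
        simp [pvS_cons, add_assoc]
      · by_cases h3 : x = 3
        · subst h3
          simp only [List.foldl_cons, if_pos (show (3:Int) = 1 ∨ (3:Int) = 2 ∨ (3:Int) = 3 ∨ (3:Int) = 4 ∨ (3:Int) = 5 ∨ (3:Int) = 6 from by norm_num)]
          rw [if_pos (show (3:Int) = 1 ∨ (3:Int) = 2 ∨ True ∨ (3:Int) = 4 ∨ (3:Int) = 5 ∨ (3:Int) = 6 from by tauto), pvmod3, ih]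
          simp [pvS_cons, add_assoc]
        · by_cases h4 : x = 4
          · subst h4
            simp only [List.foldl_cons, if_pos (show (4:Int) = 1 ∨ (4:Int) = 2 ∨ (4:Int) = 3 ∨ (4:Int) = 4 ∨ (4:Int) = 5 ∨ (4:Int) = 6 from by norm_num)]
            rw [if_pos (show (4:Int) = 1 ∨ (4:Int) = 2 ∨ (4:Int) = 3 ∨ True ∨ (4:Int) = 5 ∨ (4:Int) = 6 from by tauto), pvmod4, ih]
            simp [pvS_cons, add_assoc]
          · by_cases h5 : x = 5
            · subst h5
              simp only [List.foldl_cons, if_pos (show (5:Int) = 1 ∨ (5:Int) = 2 ∨ (5:Int) = 3 ∨ (5:Int) = 4 ∨ (5:Int) = 5 ∨ (5:Int) = 6 from by norm_num)]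
              rw [if_pos (show (5:Int) = 1 ∨ (5:Int) = 2 ∨ (5:Int) = 3 ∨ (5:Int) = 4 ∨ True ∨ (5:Int) = 6 from by tauto), pvmod5, ih]
              simp [pvS_cons, add_assoc]
            · by_cases h6 : x = 6
              · subst h6
                simp only [List.foldl_cons, if_pos (show (6:Int) = 1 ∨ (6:Int) = 2 ∨ (6:Int) = 3 ∨ (6:Int) = 4 ∨ (6:Int) = 5 ∨ (6:Int) = 6 from by norm_num)]
                rw [if_pos (show (6:Int) = 1 ∨ (6:Int) = 2 ∨ (6:Int) = 3 ∨ (6:Int) = 4 ∨ (6:Int) = 5 ∨ True from by tauto), pvmod6, ih]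
                simp [pvS_cons, add_assoc]
              · simp only [List.foldl_cons, if_neg (show ¬(x = 1 ∨ x = 2 ∨ x = 3 ∨ x = 4 ∨ x = 5 ∨ x = 6) from by tauto)]
                rw [ih]
                simp [pvS_cons, h1, h2, h3, h4, h5, h6]

theorem pvB_eq (d : List Int) :
    calcula_pontos_regra_simples_alt d =
      [(1, pvS d 1), (2, pvS d 2), (3, pvS d 3), (4, pvS d 4), (5, pvS d 5), (6, pvS d 6)] := by
  unfold calcula_pontos_regra_simples_alt
  rw [show PySem.Dict.ofList [((1:Int), (0:Int)), (2, 0), (3, 0), (4, 0), (5, 0), (6, 0)] =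
        PySem.Dict.mk [(1, 0), (2, 0), (3, 0), (4, 0), (5, 0), (6, 0)] from by decide]
  rw [pvB_fold]
  simp

-- ===== VERDICT (by name: the statement is the Claim_ definition above) =====
theorem calcula_pontos_regra_simples_spec : Claim_equal_calcula_pontos_regra_simples := by
  intro d _
  unfold Spec_calcula_pontos_regra_simples
  rw [pvA_eq, pvB_eq]
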